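-- pv_equiv track=rewrite | github.com/hellolingxh/mywordgame | mywordgame/app.py | checkDuplicateError
-- ===== SOURCE A (Python) =====
-- from collections import Counter
--
-- def checkDuplicateError(user_words_array):
--     duplicate_errors = []
--     dupCounter = Counter(user_words_array)
--
--     for key in dupCounter:
--         value = dupCounter[key]
--         if value > 1:
--             duplicate_errors.append(key)
--     return duplicate_errors
-- ===== SOURCE B (Python) =====
-- def checkDuplicateError(user_words_array):
--     seen = set()
--     dups = set()
--     for w in user_words_array:
--         if w in seen:
--             dups.add(w)
--         else:
--             seen.add(w)
--     duplicate_errors = []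
--     emitted = set()
--     for w in user_words_array:
--         if w in dups and w not in emitted:
--             duplicate_errors.append(w)
--             emitted.add(w)
--     return duplicate_errors
-- ===== Notes on version B (the rewrite author's own statement) =====
-- stated objective: alternative
-- what changed: Replaces the Counter table plus a scan over its keys by two plain list passes: the first marks words already seen into a dups set, the second re-scans the input emitting each dup once (emitted set) in first-occurrence order, so no count table is ever built.
import Mathlib
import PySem

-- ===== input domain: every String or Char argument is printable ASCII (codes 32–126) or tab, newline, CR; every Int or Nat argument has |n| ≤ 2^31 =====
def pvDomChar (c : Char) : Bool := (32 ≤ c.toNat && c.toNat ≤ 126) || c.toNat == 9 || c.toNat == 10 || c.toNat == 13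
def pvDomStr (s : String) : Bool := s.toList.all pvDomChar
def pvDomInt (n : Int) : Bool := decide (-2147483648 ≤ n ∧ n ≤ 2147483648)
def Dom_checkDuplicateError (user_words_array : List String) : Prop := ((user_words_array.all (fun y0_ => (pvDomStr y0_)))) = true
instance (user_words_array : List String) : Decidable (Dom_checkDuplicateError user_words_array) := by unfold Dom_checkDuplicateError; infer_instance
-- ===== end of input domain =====

set_option maxRecDepth 4096


-- B replaces the Counter table + key scan by two plain list passes (a seen/dups pass, then a
-- re-scan emitting each dup once in first-occurrence order); alternative decomposition, same value.

-- ===== PORT A =====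
-- duplicate_errors = []; dupCounter = Counter(...); for key in dupCounter: if dupCounter[key] > 1: append
def checkDuplicateError (user_words_array : List String) : List String :=
  let dupCounter := PySem.Dict.counter user_words_array
  dupCounter.keys.foldl
    (fun duplicate_errors key =>
      let value := dupCounter.getD key 0
      if value > 1 then duplicate_errors ++ [key] else duplicate_errors) []

-- ===== PORT B =====
-- pass 1 state (seen, dups); pass 2 state (duplicate_errors, emitted)
def checkDuplicateError_alt (user_words_array : List String) : List String :=
  let sd := user_words_array.foldl
    (fun (st : PySem.Set String × PySem.Set String) w =>
      if st.1.contains w then (st.1, st.2.add w) else (st.1.add w, st.2))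
    (PySem.Set.empty, PySem.Set.empty)
  let re := user_words_array.foldl
    (fun (st : List String × PySem.Set String) w =>
      if sd.2.contains w && !(st.2.contains w) then (st.1 ++ [w], st.2.add w) else st)
    ([], PySem.Set.empty)
  re.1

-- ===== PRECONDITION & SPEC =====
def Spec_checkDuplicateError (user_words_array : List String) (out : List String) : Prop := out = checkDuplicateError_alt user_words_array
instance (user_words_array : List String) (out : List String) : Decidable (Spec_checkDuplicateError user_words_array out) := by unfold Spec_checkDuplicateError; infer_instance

-- ===== CLAIM (what is proved, stated in full; the proofs are below) =====
def Claim_equal_checkDuplicateError : Prop := ∀ (user_words_array : List String), Dom_checkDuplicateError user_words_array → Spec_checkDuplicateError user_words_array (checkDuplicateError user_words_array)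

-- ===== LEMMAS AND PROOFS =====

-- B's first pass, from an arbitrary start state
def pass1 (l : List String) (st : PySem.Set String × PySem.Set String) :
    PySem.Set String × PySem.Set String :=
  l.foldl
    (fun (st : PySem.Set String × PySem.Set String) w =>
      if st.1.contains w then (st.1, st.2.add w) else (st.1.add w, st.2)) st

-- recursive skeleton of B's second pass (result component), for a fixed dups set
def newDups (dups : PySem.Set String) : List String → PySem.Set String → List String
  | [], _ => []
  | w :: t, em =>
    if dups.contains w && !(em.contains w) then w :: newDups dups t (em.add w)
    else newDups dups t em

-- first occurrences of a list not already in em, in order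
def firstOcc : List String → PySem.Set String → List String
  | [], _ => []
  | w :: t, em => if em.contains w then firstOcc t em else w :: firstOcc t (em.add w)

lemma contains_iff (s : PySem.Set String) (x : String) :
    s.contains x = true ↔ x ∈ s := by
  simp [PySem.Set.contains]

lemma contains_add (s : PySem.Set String) (x y : String) :
    (s.add x).contains y = (s.contains y || y == x) := by
  rw [Bool.eq_iff_iff]
  simp [PySem.Set.mem_add]

lemma mem_pass1_snd (u : String) :
    ∀ (l : List String) (seen dups : PySem.Set String),
      u ∈ (pass1 l (seen, dups)).2 ↔
        (u ∈ dups ∨ (u ∈ seen ∧ u ∈ l) ∨ 2 ≤ List.count u l) := by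
  intro l
  induction l with
  | nil => intro seen dups; simp [pass1]
  | cons w t ih =>
    intro seen dups
    simp only [pass1] at ih ⊢
    rw [List.foldl_cons]
    by_cases h : seen.contains w = true
    · have hw : w ∈ seen := (contains_iff _ _).mp h
      rw [if_pos h, ih seen (dups.add w)]
      by_cases hu : u = w
      · subst hu
        simp [PySem.Set.mem_add, hw]
      · simp [PySem.Set.mem_add, hu, Ne.symm hu]
    · have hw : w ∉ seen := fun hm => h ((contains_iff _ _).mpr hm)
      rw [if_neg h, ih (seen.add w) dups]
      by_cases hu : u = w
      · subst hu
        simp only [PySem.Set.mem_add, List.mem_cons, List.count_cons_self]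
        have hc := List.count_pos_iff (a := u) (l := t)
        constructor
        · rintro (h | ⟨_, h⟩ | h)
          · exact Or.inl h
          · right; right; have := hc.mpr h; omega
          · right; right; omega
        · rintro (h | ⟨hs, _⟩ | h)
          · exact Or.inl h
          · exact absurd hs hw
          · by_cases h2 : 2 ≤ List.count u t
            · right; right; exact h2
            · right; left
              exact ⟨Or.inr trivial, hc.mp (by omega)⟩
      · simp [PySem.Set.mem_add, hu, Ne.symm hu]

lemma pass2_eq_newDups (dups : PySem.Set String) :
    ∀ (l : List String) (acc : List String) (em : PySem.Set String),
      (l.foldl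
        (fun (st : List String × PySem.Set String) w =>
          if dups.contains w && !(st.2.contains w) then (st.1 ++ [w], st.2.add w) else st)
        (acc, em)).1 = acc ++ newDups dups l em := by
  intro l
  induction l with
  | nil => intro acc em; simp [newDups]
  | cons w t ih =>
    intro acc em
    rw [List.foldl_cons]
    by_cases h : (dups.contains w && !(em.contains w)) = true
    · rw [if_pos h]
      simp only [newDups, if_pos h]
      rw [ih (acc ++ [w]) (em.add w)]
      simp
    · rw [if_neg h]
      simp only [newDups, if_neg h]
      exact ih acc em

lemma newDups_congr (dups : PySem.Set String) :
    ∀ (l : List String) (em em' : PySem.Set String),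
      (∀ u, dups.contains u = true → (em.contains u = em'.contains u)) →
      newDups dups l em = newDups dups l em' := by
  intro l
  induction l with
  | nil => intro em em' _; simp [newDups]
  | cons w t ih =>
    intro em em' hee
    by_cases hd : dups.contains w = true
    · have hc := hee w hd
      by_cases hm : em.contains w = true
      · have hm' : em'.contains w = true := by rw [← hc]; exact hm
        have c1 : ¬ (dups.contains w && !(em.contains w)) = true := by
          rw [hm]; simp
        have c2 : ¬ (dups.contains w && !(em'.contains w)) = true := by
          rw [hm']; simp
        simp only [newDups, if_neg c1, if_neg c2]
        exact ih em em' hee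
      · have hm' : ¬ em'.contains w = true := by rw [← hc]; exact hm
        have c1 : (dups.contains w && !(em.contains w)) = true := by
          rw [hd, Bool.eq_false_iff.mpr hm]; rfl
        have c2 : (dups.contains w && !(em'.contains w)) = true := by
          rw [hd, Bool.eq_false_iff.mpr hm']; rfl
        simp only [newDups, if_pos c1, if_pos c2]
        congr 1
        apply ih
        intro u hu
        rw [contains_add, contains_add, hee u hu]
    · have c1 : ¬ (dups.contains w && !(em.contains w)) = true := by
        rw [Bool.eq_false_iff.mpr hd]; simp
      have c2 : ¬ (dups.contains w && !(em'.contains w)) = true := by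
        rw [Bool.eq_false_iff.mpr hd]; simp
      simp only [newDups, if_neg c1, if_neg c2]
      exact ih em em' hee

lemma newDups_eq_filter (dups : PySem.Set String) :
    ∀ (l : List String) (em : PySem.Set String),
      newDups dups l em = (firstOcc l em).filter (fun w => dups.contains w) := by
  intro l
  induction l with
  | nil => intro em; simp [newDups, firstOcc]
  | cons w t ih =>
    intro em
    by_cases hm : em.contains w = true
    · have c1 : ¬ (dups.contains w && !(em.contains w)) = true := by
        rw [hm]; simp
      simp only [newDups, firstOcc, if_neg c1, if_pos hm]
      exact ih em
    · by_cases hd : dups.contains w = true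
      · have c1 : (dups.contains w && !(em.contains w)) = true := by
          rw [hd, Bool.eq_false_iff.mpr hm]; rfl
        simp only [newDups, firstOcc, if_pos c1, if_neg hm,
          List.filter_cons_of_pos hd]
        rw [ih (em.add w)]
      · have c1 : ¬ (dups.contains w && !(em.contains w)) = true := by
          rw [Bool.eq_false_iff.mpr hd]; simp
        have hcong : ∀ u, dups.contains u = true →
            (em.contains u = (em.add w).contains u) := by
          intro u hu
          rw [contains_add]
          by_cases huw : u = w
          · subst huw; rw [hu] at hd; exact absurd rfl hd
          · simp [huw]
        simp only [newDups, firstOcc, if_neg c1, if_neg hm]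
        rw [List.filter_cons_of_neg hd, newDups_congr dups t em (em.add w) hcong,
          ih (em.add w)]

lemma update_eq_firstOcc :
    ∀ (l : List String) (em : PySem.Set String),
      PySem.Set.update em l = em ++ firstOcc l em := by
  intro l
  induction l with
  | nil => intro em; simp [PySem.Set.update, firstOcc]
  | cons w t ih =>
    intro em
    have hstep : PySem.Set.update em (w :: t) = PySem.Set.update (em.add w) t := rfl
    by_cases hm : em.contains w = true
    · have ha : em.add w = em := by unfold PySem.Set.add; rw [if_pos hm]
      rw [hstep, ha, ih em]
      simp only [firstOcc, if_pos hm]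
    · have ha : em.add w = em ++ [w] := by unfold PySem.Set.add; rw [if_neg hm]
      rw [hstep, ih (em.add w)]
      simp only [firstOcc, if_neg hm]
      rw [ha]
      simp

lemma ofList_eq_firstOcc (xs : List String) :
    PySem.Set.ofList xs = firstOcc xs PySem.Set.empty := by
  have h := update_eq_firstOcc xs PySem.Set.empty
  simpa [PySem.Set.ofList, PySem.Set.update, PySem.Set.empty] using h

lemma altB_eq_filter (xs : List String) :
    checkDuplicateError_alt xs =
      (firstOcc xs PySem.Set.empty).filter
        (fun w => (pass1 xs (PySem.Set.empty, PySem.Set.empty)).2.contains w) := by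
  unfold checkDuplicateError_alt
  rw [show (xs.foldl
      (fun (st : PySem.Set String × PySem.Set String) w =>
        if st.1.contains w then (st.1, st.2.add w) else (st.1.add w, st.2))
      (PySem.Set.empty, PySem.Set.empty)) = pass1 xs (PySem.Set.empty, PySem.Set.empty) from rfl]
  rw [pass2_eq_newDups _ xs [] PySem.Set.empty, newDups_eq_filter]
  simp

lemma portA_eq_filter (xs : List String) :
    checkDuplicateError xs =
      (PySem.Set.ofList xs).filter
        (fun k => decide ((1 : Int) < (PySem.Dict.counter xs).getD k 0)) := by
  rw [show checkDuplicateError xs = (PySem.Dict.counter xs).keys.foldl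
      (fun duplicate_errors key =>
        if (PySem.Dict.counter xs).getD key 0 > 1 then duplicate_errors ++ [key]
        else duplicate_errors) [] from rfl]
  rw [PySem.Dict.keys_counter]
  have h := PySem.List.foldl_append_if
    (fun k => decide ((1 : Int) < (PySem.Dict.counter xs).getD k 0)) id
    (PySem.Set.ofList xs) ([] : List String)
  simp only [decide_eq_true_eq, List.map_id, List.nil_append] at h
  simpa [gt_iff_lt] using h

-- ===== VERDICT (by name: the statement is the Claim_ definition above) =====
theorem checkDuplicateError_spec : Claim_equal_checkDuplicateError := by
  intro xs _
  unfold Spec_checkDuplicateError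
  rw [portA_eq_filter, altB_eq_filter, ofList_eq_firstOcc]
  apply List.filter_congr
  intro w _
  rw [Bool.eq_iff_iff]
  simp only [decide_eq_true_eq, PySem.Dict.getD_counter, contains_iff,
    mem_pass1_snd w xs PySem.Set.empty PySem.Set.empty]
  constructor
  · intro h
    right; right
    exact_mod_cast h
  · rintro (h | ⟨h, _⟩ | h)
    · cases h
    · cases h
    · exact_mod_cast h
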